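-- pv_equiv track=rewrite | github.com/eramajarvi/tangente-penitente | SBR/RBA/relieff.py | encontrarIndiceMax
-- ===== SOURCE A (Python) =====
-- def encontrarIndiceMax(matriz):
--     valorMax = None
--     indiceMax = None
--
--     for i in range(len(matriz)):
--         if matriz[i] == None:
--             indiceMax = i
--             return indiceMax
--
--         else:
--             if (valorMax == None) or (matriz[i] > valorMax):
--                 valorMax = matriz[i]
--                 indiceMax = i
--
--     return indiceMax
-- ===== SOURCE B (Python) =====
-- def encontrarIndiceMax(matriz):
--     for i, v in enumerate(matriz):
--         if v == None:
--             return i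
--     if not matriz:
--         return None
--     return max(enumerate(matriz), key=lambda p: p[1])[0]
-- ===== Notes on version B (the rewrite author's own statement) =====
-- stated objective: idiomatic
-- what changed: Replaces the single index loop with a manual max accumulator by an enumerate pass that returns the first None index, followed by a library argmax (max over enumerate keyed by value, which keeps the first maximal index).
import Mathlib
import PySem

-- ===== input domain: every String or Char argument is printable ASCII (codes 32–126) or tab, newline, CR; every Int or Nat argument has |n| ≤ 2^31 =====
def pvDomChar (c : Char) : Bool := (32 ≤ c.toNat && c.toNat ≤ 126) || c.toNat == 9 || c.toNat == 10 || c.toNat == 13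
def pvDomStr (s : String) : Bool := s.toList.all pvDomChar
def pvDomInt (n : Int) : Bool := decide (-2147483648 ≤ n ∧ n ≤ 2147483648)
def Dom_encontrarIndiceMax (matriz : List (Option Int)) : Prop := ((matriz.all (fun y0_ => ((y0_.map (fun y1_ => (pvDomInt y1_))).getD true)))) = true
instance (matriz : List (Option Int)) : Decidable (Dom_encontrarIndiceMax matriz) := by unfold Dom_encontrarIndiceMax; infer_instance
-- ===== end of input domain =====

-- B is the idiomatic decomposition: a first-None scan via enumerate, then a library argmax
-- (max over enumerate keyed by value, keeping the first maximal index); return values proved equal to A's.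

-- ===== PORT A =====
-- A's 'for i in range(len(matriz))' with early return is transliterated as the obvious
-- structural recursion over the list carrying the running index i and the two accumulators.
def encontrarIndiceMaxGoA : List (Option Int) → Int → Option Int → Option Int → Option Int
  | [], _, _, indiceMax => indiceMax
  | x :: xs, i, valorMax, indiceMax =>
    match x with
    | none => some i      -- matriz[i] == None: set indiceMax = i and return it
    | some v =>
      -- (valorMax == None) or (matriz[i] > valorMax); the comparison short-circuits
      match valorMax with
      | none => encontrarIndiceMaxGoA xs (i + 1) (some v) (some i)
      | some w =>
        if v > w then encontrarIndiceMaxGoA xs (i + 1) (some v) (some i)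
        else encontrarIndiceMaxGoA xs (i + 1) valorMax indiceMax

def encontrarIndiceMax (matriz : List (Option Int)) : Option Int :=
  encontrarIndiceMaxGoA matriz 0 none none

-- ===== PORT B =====
-- enumerate(matriz) starting at index i (Python indices as Int)
def pvEnumFrom : Int → List (Option Int) → List (Int × Option Int)
  | _, [] => []
  | i, x :: xs => (i, x) :: pvEnumFrom (i + 1) xs

-- first pass: first index whose value == None
def pvFindNone : List (Int × Option Int) → Option Int
  | [] => none
  | (i, none) :: _ => some i
  | (_, some _) :: ps => pvFindNone ps

-- key comparison p[1] > best[1]; in Source B this is only ever reached on int values (no None left)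
def pvKeyGt : Option Int → Option Int → Bool
  | some a, some b => a > b
  | _, _ => false

-- Python max(iterable, key=...): first element, then replace only on a strictly greater key
def pvMaxBy : List (Int × Option Int) → (Int × Option Int) → (Int × Option Int)
  | [], best => best
  | p :: ps, best => if pvKeyGt p.2 best.2 then pvMaxBy ps p else pvMaxBy ps best

def encontrarIndiceMax_alt (matriz : List (Option Int)) : Option Int :=
  match pvFindNone (pvEnumFrom 0 matriz) with
  | some i => some i
  | none =>
    match pvEnumFrom 0 matriz with
    | [] => none
    | p :: ps => some (pvMaxBy ps p).1

-- ===== PRECONDITION & SPEC =====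
def Spec_encontrarIndiceMax (matriz : List (Option Int)) (out : Option Int) : Prop := out = encontrarIndiceMax_alt matriz
instance (matriz : List (Option Int)) (out : Option Int) : Decidable (Spec_encontrarIndiceMax matriz out) := by unfold Spec_encontrarIndiceMax; infer_instance

-- ===== CLAIM (what is proved, stated in full; the proofs are below) =====
def Claim_equal_encontrarIndiceMax : Prop := ∀ (matriz : List (Option Int)), Dom_encontrarIndiceMax matriz → Spec_encontrarIndiceMax matriz (encontrarIndiceMax matriz)

-- ===== LEMMAS AND PROOFS =====

-- Core invariant: with a definite running max (w at first-max index j), A's loop equals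
-- B's None-scan followed by continuing the argmax fold over the enumerated tail.
theorem goA_eq (xs : List (Option Int)) : ∀ (i w j : Int),
    encontrarIndiceMaxGoA xs i (some w) (some j) =
      match pvFindNone (pvEnumFrom i xs) with
      | some k => some k
      | none => some (pvMaxBy (pvEnumFrom i xs) (j, some w)).1 := by
  induction xs with
  | nil => intro i w j; simp [encontrarIndiceMaxGoA, pvEnumFrom, pvFindNone, pvMaxBy]
  | cons x xs ih =>
    intro i w j
    cases x with
    | none => simp [encontrarIndiceMaxGoA, pvEnumFrom, pvFindNone]
    | some v =>
      simp only [encontrarIndiceMaxGoA, pvEnumFrom, pvFindNone, pvMaxBy, pvKeyGt]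
      by_cases h : v > w
      · simp [h, ih (i + 1) v i]
      · simp [h, ih (i + 1) w j]

-- ===== VERDICT (by name: the statement is the Claim_ definition above) =====
theorem encontrarIndiceMax_spec : Claim_equal_encontrarIndiceMax := by
  unfold Claim_equal_encontrarIndiceMax
  intro matriz _
  unfold Spec_encontrarIndiceMax encontrarIndiceMax encontrarIndiceMax_alt
  cases matriz with
  | nil => simp [encontrarIndiceMaxGoA, pvEnumFrom, pvFindNone]
  | cons x xs =>
    cases x with
    | none => simp [encontrarIndiceMaxGoA, pvEnumFrom, pvFindNone]
    | some v =>
      simp only [encontrarIndiceMaxGoA, pvEnumFrom, pvFindNone]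
      rw [goA_eq xs (0 + 1) v 0]
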